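-- pv_equiv track=rewrite | github.com/longsizhuo/AlgorithmPractice | loong's code/contest/Rookie Code Rumble/I.py | count_distinct_pairs
-- ===== SOURCE A (Python) =====
-- def count_distinct_pairs(n):
--     count = 0
--     special = 0
--     for x in range(n + 1, pow(n, 2) + 1):
--         if (x * n) % (x - n) == 0:
--             y = (x * n) // (x - n)
--             if x < y:
--                 count += 1
--             elif x == y:
--                 special += 1
--     count = count * 2 + special
--     return count
-- ===== SOURCE B (Python) =====
-- def count_distinct_pairs(n):
--     # 1/x + 1/y = 1/n  <=>  x = n + d, y = n + n^2/d with d | n^2.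
--     # Ordered pairs = divisors of n^2; those with x < y correspond to d < |n|.
--     m = abs(n)
--     if m == 0:
--         return 0
--     c = 0
--     for d in range(1, m):
--         if (m * m) % d == 0:
--             c += 1
--     return 2 * c + 1
-- ===== Notes on version B (the rewrite author's own statement) =====
-- stated objective: faster
-- what changed: A scans all x in (n, n^2] and tests (x*n) % (x-n) == 0; B substitutes d = x - n and counts the divisors d of n^2 with 1 <= d < |n| in a single O(|n|) loop, returning 2*c + 1.
-- intended difference: For n = 1 A's loop range(2, 2) is empty so A returns 0, missing the only solution x = y = 2 of 1/x + 1/y = 1; B returns the intended count 1. — e.g. on count_distinct_pairs(1): A returns 0, B returns 1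
import Mathlib
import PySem

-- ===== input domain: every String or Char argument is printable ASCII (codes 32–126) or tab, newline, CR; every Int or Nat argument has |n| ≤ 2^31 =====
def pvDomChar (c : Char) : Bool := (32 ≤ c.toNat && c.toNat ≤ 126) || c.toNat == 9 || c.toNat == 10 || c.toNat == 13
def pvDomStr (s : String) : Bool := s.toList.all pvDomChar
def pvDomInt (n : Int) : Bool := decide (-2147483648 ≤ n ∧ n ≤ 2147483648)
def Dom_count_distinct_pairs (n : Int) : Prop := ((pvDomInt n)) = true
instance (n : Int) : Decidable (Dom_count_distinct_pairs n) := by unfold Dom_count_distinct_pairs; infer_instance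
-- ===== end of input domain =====

-- B replaces A's scan over all x in (n, n^2] by a scan over d = x - n in [1, |n|) counting divisors of n^2;
-- objective: faster (asymptotic).

-- ===== PORT A =====
def count_distinct_pairs (n : Int) : Int :=
  let r := (PySem.List.pyRange (n + 1) (n ^ 2 + 1) 1).foldl
    (fun (cs : Int × Int) x =>
      if PySem.Int.mod (x * n) (x - n) = 0 then
        let y := PySem.Int.floordiv (x * n) (x - n)
        if x < y then (cs.1 + 1, cs.2)
        else if x = y then (cs.1, cs.2 + 1)
        else cs
      else cs)
    (0, 0)
  r.1 * 2 + r.2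

-- ===== PORT B =====
def count_distinct_pairs_alt (n : Int) : Int :=
  let m : Int := |n|
  if m = 0 then 0
  else
    let c := (PySem.List.pyRange 1 m 1).foldl
      (fun (c : Int) d => if PySem.Int.mod (m * m) d = 0 then c + 1 else c) 0
    2 * c + 1

-- ===== PRECONDITION & SPEC =====
-- For n = 1 A's loop range(2, 2) is empty, so A returns 0 and misses the only solution
-- x = y = 2 of 1/x + 1/y = 1; B returns the intended count 1.
def D_count_distinct_pairs (n : Int) : Prop := n = 1
instance (n : Int) : Decidable (D_count_distinct_pairs n) := by unfold D_count_distinct_pairs; infer_instance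
def Spec_count_distinct_pairs (n : Int) (out : Int) : Prop := ¬ D_count_distinct_pairs n → out = count_distinct_pairs_alt n
instance (n : Int) (out : Int) : Decidable (Spec_count_distinct_pairs n out) := by unfold Spec_count_distinct_pairs; infer_instance
def pvDiffWitness_count_distinct_pairs : Int := 1
def pvDiffWitnessOut_count_distinct_pairs : Int × Int := (0, 1)

-- ===== CLAIM (what is proved, stated in full; the proofs are below) =====
def Claim_unchanged_count_distinct_pairs : Prop := ∀ (n : Int), Dom_count_distinct_pairs n → Spec_count_distinct_pairs n (count_distinct_pairs n)
def Claim_changed_count_distinct_pairs : Prop := Dom_count_distinct_pairs (pvDiffWitness_count_distinct_pairs) ∧ D_count_distinct_pairs (pvDiffWitness_count_distinct_pairs) ∧ count_distinct_pairs (pvDiffWitness_count_distinct_pairs) = pvDiffWitnessOut_count_distinct_pairs.1 ∧ count_distinct_pairs_alt (pvDiffWitness_count_distinct_pairs) = pvDiffWitnessOut_count_distinct_pairs.2 ∧ pvDiffWitnessOut_count_distinct_pairs.1 ≠ pvDiffWitnessOut_count_distinct_pairs.2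
def Claim_exact_count_distinct_pairs : Prop := ∀ (n : Int), Dom_count_distinct_pairs n → D_count_distinct_pairs n → count_distinct_pairs n ≠ count_distinct_pairs_alt n

-- ===== LEMMAS AND PROOFS =====

-- Boolean forms of the counted events
def pvPc (n x : Int) : Bool :=
  decide (PySem.Int.mod (x * n) (x - n) = 0 ∧ x < PySem.Int.floordiv (x * n) (x - n))
def pvPs (n x : Int) : Bool :=
  decide (PySem.Int.mod (x * n) (x - n) = 0 ∧ ¬ x < PySem.Int.floordiv (x * n) (x - n)
    ∧ x = PySem.Int.floordiv (x * n) (x - n))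
def pvPb (m d : Int) : Bool := decide (PySem.Int.mod (m * m) d = 0)

-- A's loop body increments the pair by the two event indicators
theorem pvStepA (n c s x : Int) :
    (if PySem.Int.mod (x * n) (x - n) = 0 then
        if x < PySem.Int.floordiv (x * n) (x - n) then (c + 1, s)
        else if x = PySem.Int.floordiv (x * n) (x - n) then (c, s + 1)
        else (c, s)
      else (c, s))
    = (c + if pvPc n x then 1 else 0, s + if pvPs n x then 1 else 0) := by
  by_cases h1 : PySem.Int.mod (x * n) (x - n) = 0
  · by_cases h2 : x < PySem.Int.floordiv (x * n) (x - n)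
    · have e1 : pvPc n x = true := decide_eq_true ⟨h1, h2⟩
      have e2 : pvPs n x = false := decide_eq_false (fun h => h.2.1 h2)
      rw [if_pos h1, if_pos h2, e1, e2]
      simp
    · by_cases h3 : x = PySem.Int.floordiv (x * n) (x - n)
      · have e1 : pvPc n x = false := decide_eq_false (fun h => h2 h.2)
        have e2 : pvPs n x = true := decide_eq_true ⟨h1, h2, h3⟩
        rw [if_pos h1, if_neg h2, if_pos h3, e1, e2]
        simp
      · have e1 : pvPc n x = false := decide_eq_false (fun h => h2 h.2)
        have e2 : pvPs n x = false := decide_eq_false (fun h => h3 h.2.2)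
        rw [if_pos h1, if_neg h2, if_neg h3, e1, e2]
        simp
  · have e1 : pvPc n x = false := decide_eq_false (fun h => h1 h.1)
    have e2 : pvPs n x = false := decide_eq_false (fun h => h1 h.1)
    rw [if_neg h1, e1, e2]
    simp

-- A's fold accumulates the two event counts
theorem pvFoldA (n : Int) (L : List Int) (c s : Int) :
    L.foldl (fun (cs : Int × Int) x =>
      if PySem.Int.mod (x * n) (x - n) = 0 then
        if x < PySem.Int.floordiv (x * n) (x - n) then (cs.1 + 1, cs.2)
        else if x = PySem.Int.floordiv (x * n) (x - n) then (cs.1, cs.2 + 1)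
        else cs
      else cs) (c, s)
    = (c + (L.countP (pvPc n) : Int), s + (L.countP (pvPs n) : Int)) := by
  induction L generalizing c s with
  | nil => simp
  | cons x L ih =>
      simp only [List.foldl_cons]
      rw [pvStepA, ih, List.countP_cons, List.countP_cons]
      cases hpc : pvPc n x <;> cases hps : pvPs n x <;>
        simp [hpc, hps] <;> (push_cast; omega)

-- B's fold accumulates its event count
theorem pvFoldB (m : Int) (L : List Int) (c : Int) :
    L.foldl (fun (c : Int) d => if PySem.Int.mod (m * m) d = 0 then c + 1 else c) c
    = c + (L.countP (pvPb m) : Int) := by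
  induction L generalizing c with
  | nil => simp
  | cons d L ih =>
      simp only [List.foldl_cons, List.countP_cons]
      by_cases h : PySem.Int.mod (m * m) d = 0
      · have e : pvPb m d = true := decide_eq_true h
        rw [if_pos h, ih, e]
        simp
        ring
      · have e : pvPb m d = false := decide_eq_false h
        rw [if_neg h, ih, e]
        simp

-- the test in A's loop is divisibility of n^2 by d = x - n
theorem pvModChar (n x : Int) (_hx : n < x) :
    PySem.Int.mod (x * n) (x - n) = 0 ↔ (x - n) ∣ n * n := by
  rw [PySem.Int.mod_eq_zero_iff_dvd]
  have hrep : x * n = (x - n) * n + n * n := by ring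
  rw [hrep]
  exact dvd_add_right ⟨n, rfl⟩

-- under the test, y = n + (n*n)/(x - n)
theorem pvYChar (n x : Int) (hx : n < x) (hdvd : (x - n) ∣ n * n) :
    PySem.Int.floordiv (x * n) (x - n) = n + (n * n) / (x - n) := by
  have hd : (0 : Int) < x - n := by omega
  rw [PySem.Int.floordiv_eq_ediv_of_pos hd]
  obtain ⟨q, hq⟩ := hdvd
  have hrep : x * n = (x - n) * (n + q) := by rw [mul_add, ← hq]; ring
  rw [hrep, Int.mul_ediv_cancel_left (n + q) (show x - n ≠ 0 by omega), hq,
      Int.mul_ediv_cancel_left q (show x - n ≠ 0 by omega)]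

theorem pvPc_char (n x : Int) (hn : n ≠ 0) (hx : n < x) :
    pvPc n x = (pvPb |n| (x - n) && decide (x - n < |n|)) := by
  rw [pvPc, pvPb, ← Bool.decide_and, decide_eq_decide]
  have hd : (0 : Int) < x - n := by omega
  have habs : |n| * |n| = n * n := abs_mul_abs_self n
  have hm : (0 : Int) < |n| := abs_pos.mpr hn
  constructor
  · rintro ⟨h1, h2⟩
    have hdvd : (x - n) ∣ n * n := (pvModChar n x hx).mp h1
    refine ⟨(PySem.Int.mod_eq_zero_iff_dvd _ _).mpr (habs ▸ hdvd), ?_⟩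
    rw [pvYChar n x hx hdvd] at h2
    obtain ⟨q, hq⟩ := hdvd
    have hqv : (n * n) / (x - n) = q := by
      rw [hq, Int.mul_ediv_cancel_left q (show x - n ≠ 0 by omega)]
    rw [hqv] at h2
    have hlt : x - n < q := by omega
    have hsq : (x - n) * (x - n) < n * n := by
      calc (x - n) * (x - n) < (x - n) * q := mul_lt_mul_of_pos_left hlt hd
        _ = n * n := hq.symm
    nlinarith
  · rintro ⟨h1, h2⟩
    have hdvd : (x - n) ∣ n * n := by
      have := (PySem.Int.mod_eq_zero_iff_dvd (|n| * |n|) (x - n)).mp h1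
      rwa [habs] at this
    refine ⟨(pvModChar n x hx).mpr hdvd, ?_⟩
    rw [pvYChar n x hx hdvd]
    obtain ⟨q, hq⟩ := hdvd
    have hqv : (n * n) / (x - n) = q := by
      rw [hq, Int.mul_ediv_cancel_left q (show x - n ≠ 0 by omega)]
    rw [hqv]
    have hsq : (x - n) * (x - n) < n * n := by nlinarith
    have hlt : x - n < q := by
      have h' : (x - n) * (x - n) < (x - n) * q := by rw [hq] at hsq; exact hsq
      exact lt_of_mul_lt_mul_left h' (by omega)
    omega

theorem pvPs_char (n x : Int) (hn : n ≠ 0) (hx : n < x) :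
    pvPs n x = decide (x - n = |n|) := by
  rw [pvPs, decide_eq_decide]
  have hd : (0 : Int) < x - n := by omega
  have habs : |n| * |n| = n * n := abs_mul_abs_self n
  have hm : (0 : Int) < |n| := abs_pos.mpr hn
  constructor
  · rintro ⟨h1, -, h3⟩
    have hdvd : (x - n) ∣ n * n := (pvModChar n x hx).mp h1
    rw [pvYChar n x hx hdvd] at h3
    obtain ⟨q, hq⟩ := hdvd
    have hqv : (n * n) / (x - n) = q := by
      rw [hq, Int.mul_ediv_cancel_left q (show x - n ≠ 0 by omega)]
    rw [hqv] at h3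
    have hqe : q = x - n := by omega
    have hsq : (x - n) * (x - n) = n * n := by rw [hq, hqe]
    nlinarith
  · intro h
    have hdvd : (x - n) ∣ n * n := ⟨|n|, by rw [h, habs]⟩
    have hqv : (n * n) / (x - n) = x - n := by
      rw [← habs, h, Int.mul_ediv_cancel_left |n| (show (|n| : Int) ≠ 0 by omega)]
    have hy : PySem.Int.floordiv (x * n) (x - n) = x := by
      rw [pvYChar n x hx hdvd, hqv]; ring
    exact ⟨(pvModChar n x hx).mpr hdvd, by omega, hy.symm⟩

-- counting over a shifted range
theorem pvShift (p : Int → Bool) (a b t : Int) :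
    (PySem.List.pyRange (a + t) (b + t) 1).countP p
      = (PySem.List.pyRange a b 1).countP (fun d => p (d + t)) := by
  rw [PySem.List.pyRange_one (a + t) (b + t), PySem.List.pyRange_one a b]
  have hlen : b + t - (a + t) = b - a := by ring
  rw [hlen, List.countP_map, List.countP_map]
  apply List.countP_congr
  intro k _
  simp only [Function.comp_apply]
  rw [show a + t + (k : Int) = a + (k : Int) + t from by ring]

-- a range counts a single fixed value once
theorem pvCountSingle (a b v : Int) (h1 : a ≤ v) (h2 : v < b) :
    (PySem.List.pyRange a b 1).countP (fun x => decide (x = v)) = 1 := by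
  have he : (PySem.List.pyRange a b 1).countP (fun x => decide (x = v))
      = (PySem.List.pyRange a b 1).count v := by
    apply List.countP_congr
    intro x _
    simp
  rw [he, List.count_eq_one_of_mem (PySem.List.nodup_pyRange_one a b)
        (PySem.List.mem_pyRange_one.mpr ⟨h1, h2⟩)]

theorem pv_main (n : Int) (hn : n ≤ -1 ∨ 2 ≤ n) :
    count_distinct_pairs n = count_distinct_pairs_alt n := by
  have hn0 : n ≠ 0 := by omega
  have hm : (0 : Int) < |n| := abs_pos.mpr hn0
  have hsq : n ^ 2 = n * n := by ring
  have hup : n + |n| ≤ n ^ 2 := by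
    rcases hn with h | h
    · rw [abs_of_nonpos (by linarith), hsq]; nlinarith
    · rw [abs_of_nonneg (by linarith), hsq]; nlinarith
  -- unfold both ports and reduce the folds to counts
  unfold count_distinct_pairs count_distinct_pairs_alt
  simp only []
  rw [pvFoldA, if_neg (abs_ne_zero.mpr hn0), pvFoldB]
  -- the "x < y" count equals B's divisor count
  have hc : (PySem.List.pyRange (n + 1) (n ^ 2 + 1) 1).countP (pvPc n)
      = (PySem.List.pyRange 1 |n| 1).countP (pvPb |n|) := by
    have h1 : ∀ x ∈ PySem.List.pyRange (n + 1) (n ^ 2 + 1) 1,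
        pvPc n x = (pvPb |n| (x - n) && decide (x - n < |n|)) := by
      intro x hx
      have hb := PySem.List.mem_pyRange_one.mp hx
      exact pvPc_char n x hn0 (by omega)
    rw [List.countP_congr (fun x hx => by rw [h1 x hx]),
        PySem.List.pyRange_one_append (n + 1) (n + |n|) (n ^ 2 + 1)
          (by linarith) (by linarith),
        List.countP_append]
    have hz : (PySem.List.pyRange (n + |n|) (n ^ 2 + 1) 1).countP
        (fun x => pvPb |n| (x - n) && decide (x - n < |n|)) = 0 := by
      rw [List.countP_eq_zero]
      intro x hx
      have hb := PySem.List.mem_pyRange_one.mp hx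
      simp only [Bool.and_eq_true, decide_eq_true_eq, not_and]
      intro _ hlt
      linarith [hb.1]
    rw [hz, Nat.add_zero,
        show n + 1 = 1 + n from by ring, show n + |n| = |n| + n from by ring,
        pvShift (fun x => pvPb |n| (x - n) && decide (x - n < |n|)) 1 |n| n]
    apply List.countP_congr
    intro d hd
    have hb := PySem.List.mem_pyRange_one.mp hd
    simp [show d + n - n = d from by ring, hb.2]
  -- the "x = y" count is exactly 1 (the hit x = n + |n|)
  have hs : (PySem.List.pyRange (n + 1) (n ^ 2 + 1) 1).countP (pvPs n) = 1 := by
    have h1 : ∀ x ∈ PySem.List.pyRange (n + 1) (n ^ 2 + 1) 1,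
        pvPs n x = decide (x = n + |n|) := by
      intro x hx
      have hb := PySem.List.mem_pyRange_one.mp hx
      rw [pvPs_char n x hn0 (by omega), decide_eq_decide]
      constructor <;> intro h <;> linarith
    rw [List.countP_congr (fun x hx => by rw [h1 x hx]), pvCountSingle (n + 1) (n ^ 2 + 1) (n + |n|)
          (by linarith) (by linarith)]
  rw [hc, hs]
  push_cast
  ring

theorem pv_unchanged (n : Int) (hn : n ≠ 1) :
    count_distinct_pairs n = count_distinct_pairs_alt n := by
  rcases lt_trichotomy n 0 with h | h | h
  · exact pv_main n (Or.inl (by omega))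
  · subst h; decide
  · exact pv_main n (Or.inr (by omega))

-- ===== VERDICT (by name: the statement is the Claim_ definition above) =====
theorem count_distinct_pairs_spec : Claim_unchanged_count_distinct_pairs := by
  intro n _ hD
  exact pv_unchanged n hD

theorem count_distinct_pairs_changed : Claim_changed_count_distinct_pairs := by
  unfold Claim_changed_count_distinct_pairs; decide

theorem count_distinct_pairs_tight : Claim_exact_count_distinct_pairs := by
  intro n _ hD
  unfold D_count_distinct_pairs at hD
  subst hD; decide
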